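-- pv_equiv track=rewrite | github.com/zulvani/sketch2code-cnn | gflask/app.py | _group_by_threshold
-- ===== SOURCE A (Python) =====
-- def _group_by_threshold(line_words, threshold):
--     if not line_words:
--         return []
--
--     groups = []
--     current_group = [line_words[0]]
--
--     for i in range(1, len(line_words)):
--         prev_word = line_words[i-1]
--         curr_word = line_words[i]
--
--         gap = curr_word['bbox'][0] - prev_word['bbox'][2]
--
--         if gap <= threshold:
--             current_group.append(curr_word)
--         else:
--             groups.append(current_group)
--             current_group = [curr_word]
--
--     if current_group:
--         groups.append(current_group)
--
--     return groups
-- ===== SOURCE B (Python) =====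
-- def _group_by_threshold(line_words, threshold):
--     groups = []
--     for w in reversed(line_words):
--         if groups and groups[0][0]['bbox'][0] - w['bbox'][2] <= threshold:
--             groups[0].insert(0, w)
--         else:
--             groups.insert(0, [w])
--     return groups
-- ===== Notes on version B (the rewrite author's own statement) =====
-- stated objective: simpler
-- what changed: Single right-to-left pass that builds the grouping back-to-front by prepending each word to the first group (or opening a new first group), replacing A's index loop with a separate current-group accumulator and trailing flush.
import Mathlib
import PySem

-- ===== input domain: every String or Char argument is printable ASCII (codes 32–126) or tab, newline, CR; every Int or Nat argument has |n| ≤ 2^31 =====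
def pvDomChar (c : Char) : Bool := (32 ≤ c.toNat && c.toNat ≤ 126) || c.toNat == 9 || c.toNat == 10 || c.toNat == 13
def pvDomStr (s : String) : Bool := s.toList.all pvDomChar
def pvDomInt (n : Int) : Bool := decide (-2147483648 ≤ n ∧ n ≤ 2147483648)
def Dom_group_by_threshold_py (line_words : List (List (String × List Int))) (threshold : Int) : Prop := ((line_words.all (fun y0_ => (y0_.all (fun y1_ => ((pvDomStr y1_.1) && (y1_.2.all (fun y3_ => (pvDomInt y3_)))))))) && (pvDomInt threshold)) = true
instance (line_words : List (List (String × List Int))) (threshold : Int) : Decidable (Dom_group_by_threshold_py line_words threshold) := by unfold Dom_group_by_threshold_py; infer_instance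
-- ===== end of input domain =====

-- B replaces A's index loop + current-group accumulator + trailing flush by one right-to-left
-- pass that prepends each word into the front group of the result (objective: simpler).
-- (B mutates only lists it created itself; the input list and its word dicts are untouched, as in A.)


-- ===== PORT A =====
-- w['bbox'] (value [] only reached outside Pre_), w['bbox'][0], w['bbox'][2]
def pvBbox (w : List (String × List Int)) : List Int :=
  ((PySem.Dict.mk w).get? "bbox").getD []
def pvB0 (w : List (String × List Int)) : Int := PySem.List.pyGetD (pvBbox w) 0 0
def pvB2 (w : List (String × List Int)) : Int := PySem.List.pyGetD (pvBbox w) 2 0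

def group_by_threshold_py (line_words : List (List (String × List Int))) (threshold : Int) : List (List (List (String × List Int))) :=
  if line_words = [] then []
  else
    let st := (PySem.List.pyRange 1 (line_words.length : Int) 1).foldl
      (fun (st : List (List (List (String × List Int))) × List (List (String × List Int))) i =>
        let prev_word := PySem.List.pyGetD line_words (i - 1) []
        let curr_word := PySem.List.pyGetD line_words i []
        let gap := pvB0 curr_word - pvB2 prev_word
        if gap ≤ threshold then (st.1, st.2 ++ [curr_word])
        else (st.1 ++ [st.2], [curr_word]))
      ([], [PySem.List.pyGetD line_words 0 []])
    if st.2 ≠ [] then st.1 ++ [st.2] else st.1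

-- ===== PORT B =====
def group_by_threshold_py_alt (line_words : List (List (String × List Int))) (threshold : Int) : List (List (List (String × List Int))) :=
  line_words.foldr
    (fun w groups =>
      match groups with
      | [] => [[w]]
      | g :: gs =>
        -- groups[0][0] is g[0]; the default is never reached (the front group is nonempty)
        if pvB0 (PySem.List.pyGetD g 0 []) - pvB2 w ≤ threshold then (w :: g) :: gs
        else [w] :: g :: gs)
    []

-- ===== PRECONDITION & SPEC =====
-- Pre_ excludes exactly the inputs where Python A raises (KeyError/IndexError): whenever two
-- words are adjacent, the left one needs 'bbox' with length ≥ 3 (index 2) and the right one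
-- 'bbox' with length ≥ 1 (index 0).
def pvOkLeft (w : List (String × List Int)) : Bool :=
  match (PySem.Dict.mk w).get? "bbox" with
  | some v => 3 ≤ v.length
  | none => false
def pvOkRight (w : List (String × List Int)) : Bool :=
  match (PySem.Dict.mk w).get? "bbox" with
  | some v => 1 ≤ v.length
  | none => false
def Pre_group_by_threshold_py (line_words : List (List (String × List Int))) (threshold : Int) : Prop :=
  (line_words.zip line_words.tail).all (fun pc => pvOkLeft pc.1 && pvOkRight pc.2) = true
instance (line_words : List (List (String × List Int))) (threshold : Int) : Decidable (Pre_group_by_threshold_py line_words threshold) := by unfold Pre_group_by_threshold_py; infer_instance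

def pvWitness_group_by_threshold_py : (List (List (String × List Int))) × Int :=
  ([[("bbox", [0, 1, 2])], [("bbox", [9, 1, 12])], [("bbox", [14, 1, 20])]], 4)

def Spec_group_by_threshold_py (line_words : List (List (String × List Int))) (threshold : Int) (out : List (List (List (String × List Int)))) : Prop := out = group_by_threshold_py_alt line_words threshold
instance (line_words : List (List (String × List Int))) (threshold : Int) (out : List (List (List (String × List Int)))) : Decidable (Spec_group_by_threshold_py line_words threshold out) := by unfold Spec_group_by_threshold_py; infer_instance

-- ===== CLAIM (what is proved, stated in full; the proofs are below) =====
def Claim_equal_group_by_threshold_py : Prop := ∀ (line_words : List (List (String × List Int))) (threshold : Int), Dom_group_by_threshold_py line_words threshold → Pre_group_by_threshold_py line_words threshold → Spec_group_by_threshold_py line_words threshold (group_by_threshold_py line_words threshold)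

-- ===== LEMMAS AND PROOFS =====

-- forward-recursive reference grouping: fwd t w rest = the grouping of (w :: rest)
def pvFwd (t : Int) (w : List (String × List Int)) : List (List (String × List Int)) → List (List (List (String × List Int)))
  | [] => [[w]]
  | y :: ys =>
    if pvB0 y - pvB2 w ≤ t then
      match pvFwd t y ys with
      | g :: gs => (w :: g) :: gs
      | [] => [[w]]
    else [w] :: pvFwd t y ys

theorem pvFwd_shape (t : Int) (w : List (String × List Int)) (l : List (List (String × List Int))) :
    ∃ g gs, pvFwd t w l = (w :: g) :: gs := by
  cases l with
  | nil => exact ⟨[], [], rfl⟩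
  | cons y ys =>
    simp only [pvFwd]
    split
    · obtain ⟨g, gs, h⟩ := pvFwd_shape t y ys
      rw [h]
      exact ⟨y :: g, gs, rfl⟩
    · exact ⟨[], pvFwd t y ys, rfl⟩

theorem alt_eq_fwd (t : Int) (w : List (String × List Int)) (l : List (List (String × List Int))) :
    group_by_threshold_py_alt (w :: l) t = pvFwd t w l := by
  induction l generalizing w with
  | nil => rfl
  | cons y ys ih =>
    obtain ⟨g, gs, h⟩ := pvFwd_shape t y ys
    have hstep : group_by_threshold_py_alt (w :: y :: ys) t =
        (match group_by_threshold_py_alt (y :: ys) t with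
         | [] => [[w]]
         | g :: gs => if pvB0 (PySem.List.pyGetD g 0 []) - pvB2 w ≤ t then (w :: g) :: gs
                      else [w] :: g :: gs) := rfl
    rw [hstep, (ih y).trans h]
    simp only [pvFwd, h, PySem.List.pyGetD_zero_cons]

-- A's loop body on (prev, curr) pairs
def pvStep (t : Int) (st : List (List (List (String × List Int))) × List (List (String × List Int)))
    (pc : (List (String × List Int)) × (List (String × List Int))) :
    List (List (List (String × List Int))) × List (List (String × List Int)) :=
  if pvB0 pc.2 - pvB2 pc.1 ≤ t then (st.1, st.2 ++ [pc.2]) else (st.1 ++ [st.2], [pc.2])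

theorem snd_ne_nil (t : Int) (l : List ((List (String × List Int)) × (List (String × List Int))))
    (init : List (List (List (String × List Int))) × List (List (String × List Int)))
    (h : init.2 ≠ []) : (l.foldl (pvStep t) init).2 ≠ [] := by
  induction l generalizing init with
  | nil => exact h
  | cons p ps ih =>
    apply ih
    simp only [pvStep]
    split <;> simp

theorem fold_fwd (t : Int) : ∀ (rest : List (List (String × List Int))) (w : List (String × List Int))
    (groups : List (List (List (String × List Int)))) (cur : List (List (String × List Int))),
    (((w :: rest).zip rest).foldl (pvStep t) (groups, cur ++ [w])).1
      ++ [(((w :: rest).zip rest).foldl (pvStep t) (groups, cur ++ [w])).2]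
    = groups ++ ((cur ++ (pvFwd t w rest).headD []) :: (pvFwd t w rest).tail) := by
  intro rest
  induction rest with
  | nil => intro w groups cur; simp [pvFwd]
  | cons y ys ih =>
    intro w groups cur
    obtain ⟨g, gs, h⟩ := pvFwd_shape t y ys
    have hzip : (w :: y :: ys).zip (y :: ys) = (w, y) :: ((y :: ys).zip ys) := rfl
    rw [hzip]
    simp only [List.foldl_cons, pvStep]
    by_cases hgap : pvB0 y - pvB2 w ≤ t
    · rw [if_pos hgap]
      have := ih y groups (cur ++ [w])
      simp only [List.append_assoc] at this ⊢
      rw [this]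
      simp [pvFwd, hgap, h]
    · rw [if_neg hgap]
      have := ih y (groups ++ [cur ++ [w]]) []
      simp only [List.nil_append] at this
      rw [this]
      simp [pvFwd, hgap, h]

-- A's index loop is the zip fold
theorem idx_eq_zip (t : Int) (lw : List (List (String × List Int)))
    (init : List (List (List (String × List Int))) × List (List (String × List Int))) :
    (PySem.List.pyRange 1 (lw.length : Int) 1).foldl
      (fun st i =>
        let prev_word := PySem.List.pyGetD lw (i - 1) []
        let curr_word := PySem.List.pyGetD lw i []
        let gap := pvB0 curr_word - pvB2 prev_word
        if gap ≤ t then (st.1, st.2 ++ [curr_word])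
        else (st.1 ++ [st.2], [curr_word]))
      init
    = (lw.zip lw.tail).foldl (pvStep t) init := by
  cases lw with
  | nil =>
    rw [PySem.List.pyRange_one_eq_nil (by simp)]
    rfl
  | cons w rest =>
    have hPl : ((w :: rest).zip (w :: rest).tail).length = rest.length := by
      simp [List.length_zip]
    conv_rhs => rw [← PySem.List.foldl_pyRange_zero_pyGetD' (xs := (w :: rest).zip (w :: rest).tail)
      (d := ([], [])) (f := pvStep t) (init := init), hPl]
    rw [PySem.List.pyRange_one 1 ((w :: rest).length : Int), PySem.List.pyRange_one 0 (rest.length : Int)]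
    have hm : (((w :: rest).length : Int) - 1).toNat = rest.length := by simp
    have hm0 : ((rest.length : Int) - 0).toNat = rest.length := by simp
    rw [hm, hm0, List.foldl_map, List.foldl_map]
    apply PySem.List.foldl_congr_mem
    intro acc k hk
    have hklt : k < rest.length := List.mem_range.mp hk
    have h1 : (1 + (k : Int)) - 1 = (k : Int) := by omega
    have h2 : (1 + (k : Int)) = ((k + 1 : Nat) : Int) := by omega
    have h3 : (0 + (k : Int)) = ((k : Nat) : Int) := by omega
    simp only [h1]
    simp only [h2, h3, PySem.List.pyGetD_natCast]
    have hg1 : (w :: rest).getD k [] = (w :: rest)[k]'(by simp; omega) :=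
      List.getD_eq_getElem _ _ (by simp; omega)
    have hg2 : (w :: rest).getD (k + 1) [] = (w :: rest)[k + 1]'(by simp; omega) :=
      List.getD_eq_getElem _ _ (by simp; omega)
    have hg3 : ((w :: rest).zip (w :: rest).tail).getD k ([], []) =
        ((w :: rest).zip (w :: rest).tail)[k]'(by rw [hPl]; omega) :=
      List.getD_eq_getElem _ _ (by rw [hPl]; omega)
    rw [hg1, hg2, hg3]
    simp only [List.getElem_zip, List.getElem_cons_succ, pvStep]
    rfl

-- ===== VERDICT (by name: the statement is the Claim_ definition above) =====
theorem group_by_threshold_py_spec : Claim_equal_group_by_threshold_py := by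
  intro lw t _ _
  show group_by_threshold_py lw t = group_by_threshold_py_alt lw t
  cases lw with
  | nil => rfl
  | cons w rest =>
    obtain ⟨g, gs, hf⟩ := pvFwd_shape t w rest
    simp only [group_by_threshold_py, if_neg (List.cons_ne_nil w rest)]
    rw [idx_eq_zip t (w :: rest)]
    have hinit : (([], [PySem.List.pyGetD (w :: rest) 0 []]) :
        List (List (List (String × List Int))) × List (List (String × List Int)))
        = ([], [] ++ [w]) := by
      simp [PySem.List.pyGetD_zero_cons]
    rw [hinit]
    have htl : (w :: rest).tail = rest := rfl
    rw [htl]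
    have hsnd : ((((w :: rest).zip rest).foldl (pvStep t) ([], [] ++ [w]))).2 ≠ [] :=
      snd_ne_nil t _ _ (by simp)
    rw [if_pos hsnd, fold_fwd t rest w [] []]
    rw [alt_eq_fwd t w rest, hf]
    simp
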